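-- pv_equiv track=rewrite | github.com/ekaan/I0U30A-Practical-Computing-for-Bioinformatics-KUL | Practical Computing - HW2/code.py | processGenes
-- ===== SOURCE A (Python) =====
-- def processGenes(reader):
--     geneCount = {}
--     for line in reader:
--         lineArr = line.split("\t") # Extracting the values in line
--         geneID = lineArr[0][:-1]
--
--         if geneID in geneCount:
--             geneCount[geneID] += 1 # If gene ID exists in the dictionary, increase the counter for it by 1
--         else:
--             geneCount[geneID] = 1 # If not, set the counter to 1 and create a new instance
--
--     return geneCount
-- ===== SOURCE B (Python) =====
-- def processGenes(reader):
--     # Simpler two-phase rewrite: extract all IDs once, then build the count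
--     # table over the distinct IDs (first-occurrence order) in one comprehension.
--     ids = [line.split("\t")[0][:-1] for line in reader]
--     return {g: ids.count(g) for g in dict.fromkeys(ids)}
-- ===== Notes on version B (the rewrite author's own statement) =====
-- stated objective: simpler
-- what changed: Replaces the incremental dict-counting loop with a two-phase decomposition: extract every ID into a list, dedup it in first-occurrence order with dict.fromkeys, and build the result as a comprehension counting each distinct ID with list.count.
import Mathlib
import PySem

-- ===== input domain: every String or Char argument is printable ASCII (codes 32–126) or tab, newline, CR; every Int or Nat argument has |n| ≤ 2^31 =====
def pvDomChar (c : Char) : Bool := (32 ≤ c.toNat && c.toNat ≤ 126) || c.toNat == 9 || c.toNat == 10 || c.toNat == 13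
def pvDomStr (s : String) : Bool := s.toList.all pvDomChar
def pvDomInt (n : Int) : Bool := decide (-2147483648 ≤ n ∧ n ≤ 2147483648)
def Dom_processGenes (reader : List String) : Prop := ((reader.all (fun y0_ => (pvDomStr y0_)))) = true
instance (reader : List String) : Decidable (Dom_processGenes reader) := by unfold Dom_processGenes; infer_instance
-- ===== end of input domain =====

-- B replaces A's incremental dict-counting loop by extract-all / dedup / count-per-key; same return value, no speed claim.
-- ===== PORT A =====
def processGenes (reader : List String) : List (String × Int) :=
  (reader.foldl (fun geneCount line =>
      let lineArr := (PySem.Str.split? line "\t").getD []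
      let geneID := PySem.Str.slice (PySem.List.pyGetD lineArr 0 "") none (some (-1))
      if geneCount.contains geneID then
        geneCount.modify geneID 0 (· + 1)
      else
        geneCount.insert geneID 1)
    PySem.Dict.empty).items

-- ===== PORT B =====
def processGenes_alt (reader : List String) : List (String × Int) :=
  let ids := reader.map (fun line =>
      PySem.Str.slice (PySem.List.pyGetD ((PySem.Str.split? line "\t").getD []) 0 "") none (some (-1)))
  (PySem.List.dedup ids).map (fun g => (g, (ids.count g : Int)))

-- ===== PRECONDITION & SPEC =====
def Spec_processGenes (reader : List String) (out : List (String × Int)) : Prop := out = processGenes_alt reader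
instance (reader : List String) (out : List (String × Int)) : Decidable (Spec_processGenes reader out) := by unfold Spec_processGenes; infer_instance

-- ===== CLAIM (what is proved, stated in full; the proofs are below) =====
def Claim_equal_processGenes : Prop := ∀ (reader : List String), Dom_processGenes reader → Spec_processGenes reader (processGenes reader)

-- ===== LEMMAS AND PROOFS =====

-- A's loop body is Counter's update step: when the key is absent, modify with default 0 inserts 1.
lemma pv_step_eq (d : PySem.Dict String Int) (x : String) :
    (if d.contains x then d.modify x 0 (· + 1) else d.insert x 1) = d.modify x 0 (· + 1) := by
  by_cases h : d.contains x = true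
  · simp [h]
  · simp only [Bool.not_eq_true] at h
    simp [h, PySem.Dict.modify, PySem.Dict.getD_of_not_contains]

-- the ID-extraction expression shared by both loop bodies (proof-side abbreviation)
def pvExtract (line : String) : String :=
  PySem.Str.slice (PySem.List.pyGetD ((PySem.Str.split? line "\t").getD []) 0 "") none (some (-1))

-- ===== VERDICT (by name: the statement is the Claim_ definition above) =====
theorem processGenes_spec : Claim_equal_processGenes := by
  intro reader _
  show (reader.foldl (fun d line =>
          if d.contains (pvExtract line) then d.modify (pvExtract line) 0 (· + 1)
          else d.insert (pvExtract line) 1) PySem.Dict.empty).items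
      = (PySem.List.dedup (reader.map pvExtract)).map
          (fun g => (g, ((reader.map pvExtract).count g : Int)))
  have h1 : reader.foldl (fun d line =>
          if d.contains (pvExtract line) then d.modify (pvExtract line) 0 (· + 1)
          else d.insert (pvExtract line) 1) PySem.Dict.empty
      = PySem.Dict.counter (reader.map pvExtract) := by
    rw [PySem.Dict.counter_eq_foldl, List.foldl_map]
    exact PySem.List.foldl_congr_mem _ _ _ _ (fun acc x _ => pv_step_eq acc (pvExtract x))
  exact (congrArg PySem.Dict.items h1).trans (by rw [PySem.Dict.items_counter]; simp)
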